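-- pv_equiv track=rewrite | github.com/xram64/AdventOfCode2025 | day03/day03.py | build_batt_sequence
-- ===== SOURCE A (Python) =====
-- def build_batt_sequence(bank_ints: list[int], this_batt_slot:int, batt_sequence:list[int]) -> list[int]:
--     """
--     Given a battery slot (0-11) and a partial battery sequence, this recursive function will find
--     the next battery value in the sequence by finding the largest value in the `bank_ints` list
--     following the last value added to the sequence, eventually returning the largest possible
--     sequence of battery values in the original bank.
--     """
--
--     # If this is the final iteration, just find the largest battery
--     #  value in the rest of the bank (since its index doesn't matter).
--     if this_batt_slot == 11:
--         next_max_batt = max(bank_ints)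
--         batt_sequence.append(next_max_batt)
--         return batt_sequence
--
--     # Find the largest battery value in the rest of the bank and
--     #  record the first index of that value seen in `bank_ints`.
--     next_max_batt = max(bank_ints[:(this_batt_slot+1)-12])
--     next_max_batt_index = bank_ints.index(next_max_batt)
--
--     batt_sequence.append(next_max_batt)
--
--     # Recurse to find the next battery in the sequence.
--     return build_batt_sequence(bank_ints[next_max_batt_index+1:], this_batt_slot+1, batt_sequence)
-- ===== SOURCE B (Python) =====
-- def build_batt_sequence(bank_ints: list[int], this_batt_slot: int, batt_sequence: list[int]) -> list[int]:
--     # Iterative re-implementation: a moving start pointer into the original list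
--     # replaces A's recursion with repeated slicing and full-bank .index() scans.
--     n = len(bank_ints)
--     start = 0
--     for slot in range(this_batt_slot, 12):
--         if slot == 11:
--             batt_sequence.append(max(bank_ints[start:]))
--         else:
--             end = n - (11 - slot)  # window is bank_ints[start:end]
--             best = start
--             for i in range(start + 1, end):
--                 if bank_ints[i] > bank_ints[best]:
--                     best = i
--             batt_sequence.append(bank_ints[best])
--             start = best + 1
--     return batt_sequence
-- ===== Notes on version B (the rewrite author's own statement) =====
-- stated objective: alternative
-- what changed: Replaces A's recursion with repeated list slicing and full-bank .index() rescans by a single iterative loop that keeps a start pointer into the original list and finds each window's first maximum with one explicit index scan, never copying the bank.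
import Mathlib
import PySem

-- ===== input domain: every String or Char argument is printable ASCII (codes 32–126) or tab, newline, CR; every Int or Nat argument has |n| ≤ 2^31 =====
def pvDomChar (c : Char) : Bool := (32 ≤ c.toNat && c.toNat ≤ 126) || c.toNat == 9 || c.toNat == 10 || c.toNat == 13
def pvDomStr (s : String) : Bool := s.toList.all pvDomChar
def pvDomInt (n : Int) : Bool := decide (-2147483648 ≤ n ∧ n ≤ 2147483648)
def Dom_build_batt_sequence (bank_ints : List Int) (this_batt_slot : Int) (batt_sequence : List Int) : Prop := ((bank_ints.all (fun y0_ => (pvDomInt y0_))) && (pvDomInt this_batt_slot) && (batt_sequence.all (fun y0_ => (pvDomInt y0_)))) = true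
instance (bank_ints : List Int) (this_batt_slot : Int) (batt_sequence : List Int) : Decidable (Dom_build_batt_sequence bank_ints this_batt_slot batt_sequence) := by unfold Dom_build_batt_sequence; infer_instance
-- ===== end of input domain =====

-- B replaces A's recursion over sliced copies of the bank (with full-bank .index rescans) by one
-- iterative loop keeping a start pointer into the original list and an explicit first-argmax scan;
-- both mutate batt_sequence in place in Python — the equivalence proved here is about the return value.


-- ===== PORT A =====
def build_batt_sequence (bank_ints : List Int) (this_batt_slot : Int) (batt_sequence : List Int) : List Int :=
  if this_batt_slot = 11 then
    match PySem.List.max? bank_ints (fun y => y) with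
    | some m => batt_sequence ++ [m]
    | none => batt_sequence            -- max([]) raises ValueError: outside Pre_
  else
    match PySem.List.max? (PySem.List.slice bank_ints none (some (this_batt_slot + 1 - 12))) (fun y => y) with
    | none => batt_sequence            -- max of empty slice raises ValueError: outside Pre_
    | some m =>
      match h : PySem.List.index? bank_ints m with
      | none => batt_sequence          -- unreachable: m comes from a slice of bank_ints
      | some idx =>
        build_batt_sequence (bank_ints.drop (idx + 1)) (this_batt_slot + 1) (batt_sequence ++ [m])
termination_by bank_ints.length
decreasing_by
  obtain ⟨hk, -, -⟩ := PySem.List.getElem_of_index?_eq_some h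
  simp only [List.length_drop]; omega

-- ===== PORT B =====
def build_batt_sequence_alt (bank_ints : List Int) (this_batt_slot : Int) (batt_sequence : List Int) : List Int :=
  let n : Int := bank_ints.length
  ((PySem.List.pyRange this_batt_slot 12 1).foldl
    (fun (acc : Int × List Int) (slot : Int) =>
      if slot = 11 then
        match PySem.List.max? (PySem.List.slice bank_ints (some acc.1) none) (fun y => y) with
        | some m => (acc.1, acc.2 ++ [m])
        | none => acc                  -- max of empty tail raises ValueError: outside Pre_
      else
        let endi := n - (11 - slot)
        let best := (PySem.List.pyRange (acc.1 + 1) endi 1).foldl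
          (fun best i => if PySem.List.pyGetD bank_ints i 0 > PySem.List.pyGetD bank_ints best 0 then i else best) acc.1
        (best + 1, acc.2 ++ [PySem.List.pyGetD bank_ints best 0]))
    ((0 : Int), batt_sequence)).2

-- ===== PRECONDITION & SPEC =====
-- Pre_ is exactly the set of inputs on which the Python A returns (otherwise max() of an
-- empty slice raises ValueError, in particular always when this_batt_slot > 11).
def Pre_build_batt_sequence (bank_ints : List Int) (this_batt_slot : Int) (batt_sequence : List Int) : Prop :=
  this_batt_slot ≤ 11 ∧ 12 - this_batt_slot ≤ (bank_ints.length : Int)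
instance (bank_ints : List Int) (this_batt_slot : Int) (batt_sequence : List Int) : Decidable (Pre_build_batt_sequence bank_ints this_batt_slot batt_sequence) := by unfold Pre_build_batt_sequence; infer_instance
def pvWitness_build_batt_sequence : List Int × Int × List Int := ([3, 1, 4, 1, 5, 9, 2, 6, 5, 3, 5, 8], 0, [])
def Spec_build_batt_sequence (bank_ints : List Int) (this_batt_slot : Int) (batt_sequence : List Int) (out : List Int) : Prop := out = build_batt_sequence_alt bank_ints this_batt_slot batt_sequence
instance (bank_ints : List Int) (this_batt_slot : Int) (batt_sequence : List Int) (out : List Int) : Decidable (Spec_build_batt_sequence bank_ints this_batt_slot batt_sequence out) := by unfold Spec_build_batt_sequence; infer_instance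

-- ===== CLAIM (what is proved, stated in full; the proofs are below) =====
def Claim_equal_build_batt_sequence : Prop := ∀ (bank_ints : List Int) (this_batt_slot : Int) (batt_sequence : List Int), Dom_build_batt_sequence bank_ints this_batt_slot batt_sequence → Pre_build_batt_sequence bank_ints this_batt_slot batt_sequence → Spec_build_batt_sequence bank_ints this_batt_slot batt_sequence (build_batt_sequence bank_ints this_batt_slot batt_sequence)

-- ===== LEMMAS AND PROOFS =====

-- Invariant of B's inner scan: after processing indices s+1 .. s+r, the accumulator is s+c where
-- c is the first argmax of bank[s..s+r].
lemma pv_fold_inv (bank : List Int) (s : Nat) (r : Nat) :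
    ∃ c : Nat, c ≤ r ∧
      (List.range r).foldl
        (fun (b : Int) (t : Nat) => if PySem.List.pyGetD bank ((s : Int) + 1 + (t : Int)) 0 > PySem.List.pyGetD bank b 0 then (s : Int) + 1 + (t : Int) else b)
        ((s : Int))
      = (s : Int) + (c : Int) ∧
      (∀ t : Nat, t ≤ r → bank.getD (s + t) 0 ≤ bank.getD (s + c) 0) ∧
      (∀ t : Nat, t < c → bank.getD (s + t) 0 < bank.getD (s + c) 0) := by
  induction r with
  | zero =>
    refine ⟨0, le_refl _, by simp, ?_, by omega⟩
    intro t ht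
    have : t = 0 := by omega
    simp [this]
  | succ r ih =>
    obtain ⟨c, hcr, hfold, hmax, hfirst⟩ := ih
    have hc : ((s : Int) + (c : Int)) = (((s + c : Nat) : Int)) := by push_cast; ring
    have hr : ((s : Int) + 1 + (r : Int)) = (((s + (r + 1) : Nat) : Int)) := by push_cast; ring
    rw [List.range_succ, List.foldl_append, hfold]
    simp only [List.foldl_cons, List.foldl_nil, hc, hr, PySem.List.pyGetD_natCast]
    by_cases hgt : bank.getD (s + (r + 1)) 0 > bank.getD (s + c) 0
    · rw [if_pos hgt]
      refine ⟨r + 1, le_refl _, by push_cast; ring, ?_, ?_⟩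
      · intro t ht
        rcases Nat.lt_or_ge t (r + 1) with h | h
        · exact le_of_lt (lt_of_le_of_lt (hmax t (by omega)) hgt)
        · have : t = r + 1 := by omega
          simp [this]
      · intro t ht
        exact lt_of_le_of_lt (hmax t (by omega)) hgt
    · rw [if_neg hgt]
      refine ⟨c, by omega, by push_cast; ring, ?_, hfirst⟩
      intro t ht
      rcases Nat.lt_or_ge t (r + 1) with h | h
      · exact hmax t (by omega)
      · have : t = r + 1 := by omega
        simpa [this] using le_of_not_gt hgt

-- The loop body of B, as a standalone function (definitionally what build_batt_sequence_alt folds).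
def pvStep (bank : List Int) (acc : Int × List Int) (slot : Int) : Int × List Int :=
  if slot = 11 then
    match PySem.List.max? (PySem.List.slice bank (some acc.1) none) (fun y => y) with
    | some m => (acc.1, acc.2 ++ [m])
    | none => acc
  else
    let endi := (bank.length : Int) - (11 - slot)
    let best := (PySem.List.pyRange (acc.1 + 1) endi 1).foldl
      (fun best i => if PySem.List.pyGetD bank i 0 > PySem.List.pyGetD bank best 0 then i else best) acc.1
    (best + 1, acc.2 ++ [PySem.List.pyGetD bank best 0])

lemma pv_loop_eq (bank : List Int) (k : Nat) :
    ∀ (slot : Int) (s : Nat) (seq : List Int),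
      slot + (k : Int) = 11 → s + k + 1 ≤ bank.length →
      build_batt_sequence (bank.drop s) slot seq
        = ((PySem.List.pyRange slot 12 1).foldl (pvStep bank) ((s : Int), seq)).2 := by
  induction k with
  | zero =>
    intro slot s seq hslot hlen
    have h11 : slot = 11 := by omega
    subst h11
    have hne : bank.drop s ≠ [] := by
      intro h
      have := congrArg List.length h
      simp at this
      omega
    rw [show (12 : Int) = 11 + 1 by norm_num, PySem.List.pyRange_one_cons (by omega),
        PySem.List.pyRange_one_eq_nil (by omega)]
    cases hmax : PySem.List.max? (bank.drop s) (fun y => y) with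
    | none => exact absurd ((PySem.List.max?_eq_none_iff _ _).mp hmax) hne
    | some m =>
      rw [build_batt_sequence]
      simp only [List.foldl_cons, List.foldl_nil, pvStep,
        PySem.List.slice_from_natCast]
      simp [hmax]
  | succ k ih =>
    intro slot s seq hslot hlen
    have hne11 : slot ≠ 11 := by omega
    have hlt12 : slot < 12 := by omega
    have hwpos : 0 < bank.length - s - (k + 1) := by omega
    set wlen := bank.length - s - (k + 1) with hwlen
    have hsw : s + wlen ≤ bank.length := by omega
    set w := (bank.drop s).take wlen with hw
    have hwlen' : w.length = wlen := by
      simp [hw]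
      omega
    have hwne : w ≠ [] := by
      intro h
      rw [h] at hwlen'
      simp at hwlen'
      omega
    -- unfold A one step and rewrite its window to w
    rw [build_batt_sequence, if_neg hne11,
        show slot + 1 - 12 = -(((k + 1 : Nat)) : Int) by push_cast; omega,
        PySem.List.slice_to_neg_natCast _ (k + 1) (by omega), List.length_drop, ← hwlen, ← hw]
    split
    next hmax => exact absurd ((PySem.List.max?_eq_none_iff _ _).mp hmax) hwne
    next m hmax =>
      have hm_mem : m ∈ w := PySem.List.max?_mem hmax
      obtain ⟨j, hj⟩ := Option.isSome_iff_exists.mp ((PySem.List.index?_isSome_iff w m).mpr hm_mem)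
      obtain ⟨hjlt, hjval, hjfirst⟩ := PySem.List.getElem_of_index?_eq_some hj
      have hjw : j < wlen := hwlen' ▸ hjlt
      have hidxeq : PySem.List.index? (List.drop s bank) m = some j := by
        rw [show List.drop s bank = w ++ (List.drop s bank).drop wlen by rw [hw, List.take_append_drop],
            PySem.List.index?_append_of_mem _ hm_mem, hj]
      split
      next hidx2 => rw [hidx2] at hidxeq; exact absurd hidxeq (by simp)
      next idx hidx2 =>
      have hij : idx = j := by rw [hidx2] at hidxeq; exact Option.some.inj hidxeq
      rw [hij]
      -- value access bridge: bank.getD (s+t) 0 = w[t] for t < wlen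
      have hwget : ∀ t (ht : t < wlen), bank.getD (s + t) 0 = w[t]'(hwlen' ▸ ht) := by
        intro t ht
        have hlt : s + t < bank.length := by omega
        rw [List.getD_eq_getElem _ _ hlt]
        simp [hw, List.getElem_take, List.getElem_drop]
      -- B's inner scan lands on s + j
      obtain ⟨c, hcle, hfold, hmaxc, hfirstc⟩ := pv_fold_inv bank s (wlen - 1)
      have hcw : c < wlen := by omega
      have hmaxw : ∀ t (ht : t < wlen), w[t]'(hwlen' ▸ ht) ≤ m :=
        fun t ht => PySem.List.max?_isMax hmax _ (List.getElem_mem _)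
      have hcj : c = j := by
        rcases Nat.lt_trichotomy c j with h | h | h
        · exfalso
          have h1 : bank.getD (s + j) 0 ≤ bank.getD (s + c) 0 := hmaxc j (by omega)
          rw [hwget j hjw, hwget c hcw, hjval] at h1
          exact hjfirst c h (le_antisymm (hmaxw c hcw) h1)
        · exact h
        · exfalso
          have h1 : bank.getD (s + j) 0 < bank.getD (s + c) 0 := hfirstc j h
          rw [hwget j hjw, hwget c hcw, hjval] at h1
          exact absurd (hmaxw c hcw) (not_le.mpr h1)
      rw [hcj] at hfold
      -- evaluate B's first iteration
      have hstep : pvStep bank ((s : Int), seq) slot = (((s + j + 1 : Nat) : Int), seq ++ [m]) := by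
        rw [pvStep, if_neg hne11]
        simp only
        rw [show (bank.length : Int) - (11 - slot) = (s : Int) + (wlen : Int) by omega,
            PySem.List.pyRange_one, show (((s : Int) + (wlen : Int)) - ((s : Int) + 1)).toNat = wlen - 1 by omega,
            List.foldl_map, hfold,
            show (s : Int) + (j : Int) = (((s + j : Nat)) : Int) by push_cast; ring,
            PySem.List.pyGetD_natCast]
        rw [show bank.getD (s + j) 0 = m by rw [hwget j hjw, hjval]]
        simp only [Prod.mk.injEq]
        exact ⟨by omega, trivial⟩
      rw [PySem.List.pyRange_one_cons hlt12, List.foldl_cons, hstep]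
      -- A recurses; apply the induction hypothesis at start s + j + 1
      have hdd : (List.drop s bank).drop (j + 1) = List.drop (s + (j + 1)) bank := List.drop_drop
      rw [hdd, show s + (j + 1) = s + j + 1 by omega]
      exact ih (slot + 1) (s + j + 1) (seq ++ [m]) (by omega) (by omega)

-- ===== VERDICT (by name: the statement is the Claim_ definition above) =====
theorem build_batt_sequence_spec : Claim_equal_build_batt_sequence := by
  intro bank slot0 seq hdom hpre
  obtain ⟨h1, h2⟩ := hpre
  unfold Spec_build_batt_sequence
  have hk : slot0 + (((11 - slot0).toNat : Nat) : Int) = 11 := by omega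
  have hlen : 0 + (11 - slot0).toNat + 1 ≤ bank.length := by omega
  have h := pv_loop_eq bank (11 - slot0).toNat slot0 0 seq hk hlen
  simpa [build_batt_sequence_alt, pvStep] using h
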